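-- pv_equiv track=rewrite | github.com/AimeCesaireM/enervige | cryptanalyse_vigenere.py | clef_par_decalages
-- ===== SOURCE A (Python) =====
-- alphabet = "ABCDEFGHIJKLMNOPQRSTUVWXYZ"
--
-- def freq(txt):
--     """
--     Cree un histograme de fréquences des lettres d'un texte
--     Args:
--         txt (str): Le texte à analyser
--     Returns:
--         list: Une liste de fréquences des lettres arrangees par index de l'alphabet
--     """
--     hist = [0.0] * len(alphabet)
--     for c in txt:
--         hist[alphabet.index(c)] += 1
--     return hist
--
-- def lettre_freq_max(txt):
--     """
--     Donne la lettre la plus fréquente d'un texte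
--     Args:
--         txt (str): Le texte à analyser
--     Returns:
--         int: L'indice de cette lettre dans l'alphabet
--     """
--     l = freq(txt)
--     return l.index(max(l))
--
-- def columnsExtractor(cipher, key_length):
--     """
--     Renvoie les colonnes d'un texte divisee par une clef de facon Vigenere.
--     Divise le texte en liste de colonnes; la liste est de longueur key_length
--     Args:
--         cipher (str): Le texte à diviser
--         key_length (int): La longueur de la liste (= la longueur de la clé)
--     Returns:
--         list: Une liste de colonnes de longueur key_length
--     """
--     columns = [""] * key_length
--     for index, char in enumerate(cipher):
--         columns[index % key_length] += char
--     return columns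
--
-- def clef_par_decalages(cipher, key_length):
--     """
--     Renvoie le tableau des décalages probables, etant
--     donné la longueur de la clé en utilisant la lettre
--     la plus fréquente de chaque colonne.
--     La lettre la plus fréquente de chaque colonne est considerée
--     comme le chiffre du caractère E.
--     Args:
--         cipher (str): Le texte
--         key_length (int): La longueur de la clé
--     Returns:
--         list: Le tableau des décalages probables
--     """
--     decalages = [0] * key_length
--     columns = columnsExtractor(cipher, key_length)
--     for index, col in enumerate(columns):
--         mostFrequentIndex = lettre_freq_max(col)
--         decalageRaw = mostFrequentIndex - alphabet.index("E")
--         if decalageRaw < 0: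
--             decalageRaw += len(alphabet)
--         decalages[index] = decalageRaw
--
--     return decalages
-- ===== SOURCE B (Python) =====
-- alphabet = "ABCDEFGHIJKLMNOPQRSTUVWXYZ"
--
-- def clef_par_decalages(cipher, key_length):
--     # One fused pass: per-column letter counts built directly, no intermediate column strings.
--     counts = [[0] * 26 for _ in range(key_length)]
--     for index, char in enumerate(cipher):
--         counts[index % key_length][alphabet.index(char)] += 1
--     return [(row.index(max(row)) - 4) % 26 for row in counts]
-- ===== Notes on version B (the rewrite author's own statement) =====
-- stated objective: faster
-- what changed: B fuses A's three passes (build column strings by repeated concatenation, then per-column frequency histogram via lettre_freq_max, then shift table) into one pass that increments a per-column 26-entry count table directly, dropping the intermediate column strings and the preallocated decalages array.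
import Mathlib
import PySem

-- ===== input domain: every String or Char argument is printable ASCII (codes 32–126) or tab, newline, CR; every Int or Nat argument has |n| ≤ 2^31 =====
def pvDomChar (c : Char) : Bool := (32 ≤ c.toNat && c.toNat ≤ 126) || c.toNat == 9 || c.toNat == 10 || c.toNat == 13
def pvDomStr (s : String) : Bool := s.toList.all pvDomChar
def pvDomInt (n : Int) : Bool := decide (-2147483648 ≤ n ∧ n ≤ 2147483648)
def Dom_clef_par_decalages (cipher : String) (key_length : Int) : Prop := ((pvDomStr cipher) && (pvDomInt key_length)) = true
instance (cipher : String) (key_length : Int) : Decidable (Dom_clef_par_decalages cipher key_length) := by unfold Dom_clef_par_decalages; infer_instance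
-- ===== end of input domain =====

-- B fuses A's three passes (column strings, per-column histogram, shift table) into one
-- counting pass over the cipher, dropping the intermediate column strings built by repeated concatenation.

-- ===== PORT A =====
def pvAlpha : List Char :=
  ['A','B','C','D','E','F','G','H','I','J','K','L','M','N','O','P','Q','R','S','T','U','V','W','X','Y','Z']

-- freq: hist[alphabet.index(c)] += 1.  The Python hist holds floats 0.0, 1.0, … that are exact
-- small integers; ported as Int (exact).  alphabet.index(c) raises ValueError for c outside the
-- alphabet — excluded by Pre_; the port's `.getD 0` default is never reached there under Pre_.
def pvFreqStep (hist : List Int) (c : Char) : List Int :=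
  let j := (PySem.List.index? pvAlpha c).getD 0
  hist.set j (hist.getD j 0 + 1)

def pvFreq (txt : List Char) : List Int :=
  txt.foldl pvFreqStep (List.replicate 26 0)

-- lettre_freq_max: l.index(max(l)).  max([]) would raise, but l always has length 26 here;
-- the `none`/`getD` branches are unreachable defaults.
def pvLettreFreqMax (l : List Int) : Int :=
  match PySem.List.max? l (fun x => x) with
  | none => 0
  | some m => ((PySem.List.index? l m).getD 0 : Int)

-- loop body of columnsExtractor: columns[index % key_length] += char
def pvColStep (key_length : Int) (cols : List (List Char)) (p : Int × Char) : List (List Char) :=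
  let r := PySem.Int.mod p.1 key_length
  PySem.List.pySetD cols r (PySem.List.pyGetD cols r [] ++ [p.2])

def pvColumnsExtractor (cipher : List Char) (key_length : Int) : List (List Char) :=
  (PySem.List.enumerate cipher 0).foldl (pvColStep key_length) (List.replicate key_length.toNat [])

-- per-column body of A's final loop; alphabet.index("E") = 4, len(alphabet) = 26 (literals)
def pvShift (col : List Char) : Int :=
  let m := pvLettreFreqMax (pvFreq col)
  let raw := m - 4
  if raw < 0 then raw + 26 else raw

def clef_par_decalages (cipher : String) (key_length : Int) : List Int :=
  let columns := pvColumnsExtractor cipher.toList key_length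
  (PySem.List.enumerate columns 0).foldl
    (fun dec p => PySem.List.pySetD dec p.1 (pvShift p.2))
    (List.replicate key_length.toNat 0)

-- ===== PORT B =====
-- loop body of B's single counting pass: counts[index % key_length][alphabet.index(char)] += 1
def pvCountStep (key_length : Int) (cs : List (List Int)) (p : Int × Char) : List (List Int) :=
  let r := PySem.Int.mod p.1 key_length
  let j := (PySem.List.index? pvAlpha p.2).getD 0
  let row := PySem.List.pyGetD cs r []
  PySem.List.pySetD cs r (row.set j (row.getD j 0 + 1))

-- (row.index(max(row)) - 4) % 26
def pvRowShift (row : List Int) : Int :=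
  PySem.Int.mod (((PySem.List.index? row ((PySem.List.max? row (fun x => x)).getD 0)).getD 0 : Int) - 4) 26

def clef_par_decalages_alt (cipher : String) (key_length : Int) : List Int :=
  let counts : List (List Int) := List.replicate key_length.toNat (List.replicate 26 0)
  let counts := (PySem.List.enumerate cipher.toList 0).foldl (pvCountStep key_length) counts
  counts.map pvRowShift

-- ===== PRECONDITION & SPEC =====
-- Pre_ excludes exactly the inputs where A raises: key_length ≤ 0 with a nonempty cipher
-- (ZeroDivisionError / IndexError) and any character outside 'A'..'Z' (ValueError).
def Pre_clef_par_decalages (cipher : String) (key_length : Int) : Prop :=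
  (cipher.toList = [] ∨ 0 < key_length) ∧ cipher.toList.all (fun c => pvAlpha.contains c) = true
instance (cipher : String) (key_length : Int) : Decidable (Pre_clef_par_decalages cipher key_length) := by
  unfold Pre_clef_par_decalages; infer_instance

def pvWitness_clef_par_decalages : String × Int := ("ABCAB", 2)

def Spec_clef_par_decalages (cipher : String) (key_length : Int) (out : List Int) : Prop := out = clef_par_decalages_alt cipher key_length
instance (cipher : String) (key_length : Int) (out : List Int) : Decidable (Spec_clef_par_decalages cipher key_length out) := by unfold Spec_clef_par_decalages; infer_instance

-- ===== CLAIM (what is proved, stated in full; the proofs are below) =====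
def Claim_equal_clef_par_decalages : Prop := ∀ (cipher : String) (key_length : Int), Dom_clef_par_decalages cipher key_length → Pre_clef_par_decalages cipher key_length → Spec_clef_par_decalages cipher key_length (clef_par_decalages cipher key_length)

-- ===== LEMMAS AND PROOFS =====

set_option maxRecDepth 8000 in
theorem clef_par_decalages_witness_ok :
    Dom_clef_par_decalages pvWitness_clef_par_decalages.1 pvWitness_clef_par_decalages.2 ∧
    Pre_clef_par_decalages pvWitness_clef_par_decalages.1 pvWitness_clef_par_decalages.2 := by
  constructor <;> decide

theorem pvFreq_length (txt : List Char) : (pvFreq txt).length = 26 := by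
  suffices h : ∀ (hist : List Int), (txt.foldl pvFreqStep hist).length = hist.length by
    simpa using h (List.replicate 26 0)
  induction txt with
  | nil => intro hist; rfl
  | cons c t ih => intro hist; simp [List.foldl_cons, ih, pvFreqStep]

theorem pvFreq_append (col : List Char) (c : Char) :
    pvFreq (col ++ [c]) = pvFreqStep (pvFreq col) c := by
  simp [pvFreq, List.foldl_append]

theorem pvColStep_length (k : Int) (cols : List (List Char)) (p : Int × Char) :
    (pvColStep k cols p).length = cols.length := by
  simp [pvColStep, PySem.List.length_pySetD]

theorem pvStep_map (k : Int) (hk : 0 < k) (cols : List (List Char)) (p : Int × Char)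
    (hlen : cols.length = k.toNat) :
    pvCountStep k (cols.map pvFreq) p = (pvColStep k cols p).map pvFreq := by
  have hr0 : 0 ≤ PySem.Int.mod p.1 k := PySem.Int.mod_nonneg _ hk
  have hrlt : PySem.Int.mod p.1 k < k := PySem.Int.mod_lt _ hk
  have hm : PySem.Int.mod p.1 k < (cols.length : Int) := by omega
  have hm' : PySem.Int.mod p.1 k < ((cols.map pvFreq).length : Int) := by
    simpa using hm
  show PySem.List.pySetD (cols.map pvFreq) _ _ = _
  rw [PySem.List.pySetD_of_nonneg _ _ hr0,
      PySem.List.pyGetD_eq_getElem _ _ hr0 hm',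
      List.getElem_map]
  show _ = List.map pvFreq (PySem.List.pySetD cols _ _)
  rw [PySem.List.pySetD_of_nonneg _ _ hr0,
      PySem.List.pyGetD_eq_getElem _ _ hr0 hm,
      List.map_set, pvFreq_append]
  rfl

theorem pvFold_map (k : Int) (hk : 0 < k) (l : List (Int × Char)) (cols : List (List Char))
    (hlen : cols.length = k.toNat) :
    l.foldl (pvCountStep k) (cols.map pvFreq) = (l.foldl (pvColStep k) cols).map pvFreq := by
  induction l generalizing cols with
  | nil => rfl
  | cons p t ih =>
      simp only [List.foldl_cons]
      rw [pvStep_map k hk cols p hlen]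
      exact ih _ (by rw [pvColStep_length]; exact hlen)

theorem pvCounts_eq (cipher : List Char) (k : Int) (hpre : cipher = [] ∨ 0 < k) :
    (PySem.List.enumerate cipher 0).foldl (pvCountStep k)
        (List.replicate k.toNat (List.replicate 26 0))
      = (pvColumnsExtractor cipher k).map pvFreq := by
  have hbase : (List.replicate k.toNat ([] : List Char)).map pvFreq
      = List.replicate k.toNat (List.replicate 26 0) := by
    simp [List.map_replicate, pvFreq]
  rcases hpre with h | hk
  · subst h
    simp [pvColumnsExtractor, PySem.List.enumerate_nil, hbase]
  · rw [← hbase, pvFold_map k hk _ _ (by simp)]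
    rfl

theorem pvFoldCol_length (k : Int) (l : List (Int × Char)) (init : List (List Char)) :
    (l.foldl (pvColStep k) init).length = init.length := by
  induction l generalizing init with
  | nil => rfl
  | cons p t ih => rw [List.foldl_cons, ih, pvColStep_length]

theorem pvColumns_length (cipher : List Char) (k : Int) :
    (pvColumnsExtractor cipher k).length = k.toNat := by
  unfold pvColumnsExtractor
  rw [pvFoldCol_length, List.length_replicate]

theorem pvRowShift_freq (col : List Char) : pvRowShift (pvFreq col) = pvShift col := by
  have hlen := pvFreq_length col
  unfold pvRowShift pvShift pvLettreFreqMax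
  cases hmax : PySem.List.max? (pvFreq col) (fun x => x) with
  | none =>
      have := (PySem.List.max?_eq_none_iff _ _).mp hmax
      exact absurd (congrArg List.length this) (by rw [hlen]; simp)
  | some m =>
      cases hidx : PySem.List.index? (pvFreq col) m with
      | none =>
          exact absurd ((PySem.List.index?_eq_none_iff _ _).mp hidx)
            (not_not_intro (PySem.List.max?_mem hmax))
      | some j =>
          obtain ⟨hj, -, -⟩ := PySem.List.getElem_of_index?_eq_some hidx
          rw [hlen] at hj
          have h26 : (0 : Int) < 26 := by norm_num
          rw [PySem.Int.mod_eq_emod_of_pos h26]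
          simp only [Option.getD_some, hidx]
          omega

theorem pvDecFold (xs : List (List Char)) (pre : List Int) :
    (PySem.List.enumerate xs (pre.length : Int)).foldl
        (fun dec p => PySem.List.pySetD dec p.1 (pvShift p.2))
        (pre ++ List.replicate xs.length 0)
      = pre ++ xs.map pvShift := by
  induction xs generalizing pre with
  | nil => simp [PySem.List.enumerate_nil]
  | cons x t ih =>
      rw [PySem.List.enumerate_cons, List.foldl_cons]
      have hset : PySem.List.pySetD (pre ++ List.replicate (x :: t).length 0)
          ((pre.length : Int), x).1 (pvShift x)
          = (pre ++ [pvShift x]) ++ List.replicate t.length 0 := by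
        rw [PySem.List.pySetD_of_nonneg _ _ (by positivity)]
        simp [List.replicate_succ]
      rw [hset]
      have hlen : ((pre.length : Int) + 1) = (((pre ++ [pvShift x]).length : Nat) : Int) := by
        simp
      rw [hlen, ih (pre ++ [pvShift x])]
      simp

-- ===== VERDICT (by name: the statement is the Claim_ definition above) =====
theorem clef_par_decalages_spec : Claim_equal_clef_par_decalages := by
  intro cipher k _ hpre
  unfold Spec_clef_par_decalages
  show (PySem.List.enumerate (pvColumnsExtractor cipher.toList k) 0).foldl
      (fun dec p => PySem.List.pySetD dec p.1 (pvShift p.2)) (List.replicate k.toNat 0)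
    = ((PySem.List.enumerate cipher.toList 0).foldl (pvCountStep k)
        (List.replicate k.toNat (List.replicate 26 0))).map pvRowShift
  rw [pvCounts_eq cipher.toList k hpre.1]
  have hlen := pvColumns_length cipher.toList k
  have hfold := pvDecFold (pvColumnsExtractor cipher.toList k) []
  simp only [List.length_nil, List.nil_append, Nat.cast_zero] at hfold
  rw [← hlen, hfold, List.map_map]
  exact List.map_congr_left (fun col _ => (pvRowShift_freq col).symm)
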